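-- pv_equiv track=rewrite | github.com/luke-dixon/aoc | 2018/20/day20.py | find_max_depth
-- ===== SOURCE A (Python) =====
-- def find_max_depth(data):
--     depth = 0
--     max_depth = 0
--     max_depth_index = 0
--     for i, c in enumerate(data):
--         if c == '(':
--             depth += 1
--             if max_depth < depth:
--                 max_depth = depth
--                 max_depth_index = i
--         if c == ')':
--             depth -= 1
--     return max_depth_index, max_depth
-- ===== SOURCE B (Python) =====
-- def find_max_depth(data):
--     depth = 0
--     pairs = []
--     for i, c in enumerate(data):
--         if c == '(':
--             depth += 1
--             pairs.append((depth, i))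
--         elif c == ')':
--             depth -= 1
--     best = max([(0, 0)] + pairs, key=lambda t: t[0])
--     return best[1], best[0]
-- ===== Notes on version B (the rewrite author's own statement) =====
-- stated objective: alternative
-- what changed: Replaces A's online first-max bookkeeping (tracking max_depth/max_depth_index inside the scan) with a build-table-then-argmax reduction: one pass records a depth-index pair per opening paren, then a single max keyed on depth, with a zero baseline prepended, picks the winner exactly as A does.
import Mathlib
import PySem

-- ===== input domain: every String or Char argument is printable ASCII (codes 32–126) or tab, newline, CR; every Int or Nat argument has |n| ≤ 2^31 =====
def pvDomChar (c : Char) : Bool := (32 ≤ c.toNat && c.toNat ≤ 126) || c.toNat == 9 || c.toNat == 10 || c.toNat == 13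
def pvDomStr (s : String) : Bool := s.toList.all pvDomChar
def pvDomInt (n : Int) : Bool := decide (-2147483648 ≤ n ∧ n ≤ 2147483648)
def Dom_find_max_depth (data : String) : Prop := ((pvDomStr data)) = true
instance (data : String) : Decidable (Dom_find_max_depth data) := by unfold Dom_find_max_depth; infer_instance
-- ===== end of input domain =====

-- B replaces A's online first-max bookkeeping with a build-(depth,index)-table-then-argmax reduction; objective: alternative decomposition.

-- ===== PORT A =====
def fmdStepA (st : Int × Int × Int) (ic : Int × Char) : Int × Int × Int :=
  match st, ic with
  | (depth, md, mi), (i, c) =>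
    let depth := if c = '(' then depth + 1 else depth
    let p := if c = '(' ∧ md < depth then (depth, i) else (md, mi)
    let depth := if c = ')' then depth - 1 else depth
    (depth, p.1, p.2)

def find_max_depth (data : String) : Int × Int :=
  let st := (PySem.List.enumerate data.toList).foldl fmdStepA (0, 0, 0)
  (st.2.2, st.2.1)

-- ===== PORT B =====
def fmdStepB (st : Int × List (Int × Int)) (ic : Int × Char) : Int × List (Int × Int) :=
  match st, ic with
  | (depth, pairs), (i, c) =>
    if c = '(' then (depth + 1, pairs ++ [(depth + 1, i)])
    else if c = ')' then (depth - 1, pairs)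
    else (depth, pairs)

def find_max_depth_alt (data : String) : Int × Int :=
  let st := (PySem.List.enumerate data.toList).foldl fmdStepB (0, [])
  let best := PySem.List.maxD (((0 : Int), (0 : Int)) :: st.2) (fun t => t.1) (0, 0)
  (best.2, best.1)

-- ===== PRECONDITION & SPEC =====
def Spec_find_max_depth (data : String) (out : Int × Int) : Prop := out = find_max_depth_alt data
instance (data : String) (out : Int × Int) : Decidable (Spec_find_max_depth data out) := by unfold Spec_find_max_depth; infer_instance

-- ===== CLAIM (what is proved, stated in full; the proofs are below) =====
def Claim_equal_find_max_depth : Prop := ∀ (data : String), Dom_find_max_depth data → Spec_find_max_depth data (find_max_depth data)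

-- ===== LEMMAS AND PROOFS =====

-- the running-argmax step of Python's max(..., key=lambda t: t[0]) (first extremal wins ties)
def fmdStepM (m y : Int × Int) : Int × Int := if m.1 < y.1 then y else m

theorem fmd_maxD_cons (ps : List (Int × Int)) (m : Int × Int) :
    PySem.List.maxD (m :: ps) (fun t => t.1) (0, 0) = ps.foldl fmdStepM m := by
  induction ps generalizing m with
  | nil => rfl
  | cons y t ih =>
    by_cases h : m.1 < y.1 <;>
      simp only [PySem.List.maxD, PySem.List.max?, List.foldl, h, if_true, if_false,
        fmdStepM] at ih ⊢ <;> exact ih _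

theorem fmd_invariant (l : List (Int × Char)) :
    ∀ (d md mi : Int) (ps : List (Int × Int)), ps.foldl fmdStepM (0, 0) = (md, mi) →
      (l.foldl fmdStepA (d, md, mi)).1 = (l.foldl fmdStepB (d, ps)).1 ∧
      ((l.foldl fmdStepA (d, md, mi)).2.1, (l.foldl fmdStepA (d, md, mi)).2.2)
        = (l.foldl fmdStepB (d, ps)).2.foldl fmdStepM (0, 0) := by
  induction l with
  | nil => intro d md mi ps h; exact ⟨rfl, h.symm⟩
  | cons ic t ih =>
    intro d md mi ps h
    obtain ⟨i, c⟩ := ic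
    by_cases hop : c = '('
    · subst hop
      by_cases hlt : md < d + 1
      · have h' : (ps ++ [(d + 1, i)]).foldl fmdStepM (0, 0) = (d + 1, i) := by
          rw [List.foldl_append, h]; simp [fmdStepM, hlt]
        simpa [List.foldl, fmdStepA, fmdStepB, hlt] using ih (d + 1) (d + 1) i (ps ++ [(d + 1, i)]) h'
      · have h' : (ps ++ [(d + 1, i)]).foldl fmdStepM (0, 0) = (md, mi) := by
          rw [List.foldl_append, h]; simp [fmdStepM, hlt]
        simpa [List.foldl, fmdStepA, fmdStepB, hlt] using ih (d + 1) md mi (ps ++ [(d + 1, i)]) h'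
    · by_cases hcl : c = ')'
      · subst hcl
        simpa [List.foldl, fmdStepA, fmdStepB] using ih (d - 1) md mi ps h
      · simpa [List.foldl, fmdStepA, fmdStepB, hop, hcl] using ih d md mi ps h

-- ===== VERDICT (by name: the statement is the Claim_ definition above) =====
theorem find_max_depth_spec : Claim_equal_find_max_depth := by
  intro data _
  unfold Spec_find_max_depth find_max_depth find_max_depth_alt
  have h := fmd_invariant (PySem.List.enumerate data.toList) 0 0 0 [] rfl
  have h2 := h.2
  simp only [fmd_maxD_cons, ← h2]
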